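-- pv_equiv track=rewrite | github.com/Showerss/Learning | .vscode/practice.py | speedwagon
-- ===== SOURCE A (Python) =====
-- def speedwagon(bar):
--     found = False
--     for i in range(len(bar) - 1):
--         if bar[i] == bar[i+1]:
--             found = True
--         else:
--             found = False
--     return found
-- ===== SOURCE B (Python) =====
-- def speedwagon(bar):
--     # closed form: the loop overwrites `found` every pass, so only the
--     # final comparison (of the last two elements) matters
--     return len(bar) >= 2 and bar[-2] == bar[-1]
-- ===== Notes on version B (the rewrite author's own statement) =====
-- stated objective: simpler
-- what changed: Replaces the whole-list scan (whose flag is overwritten each iteration) with a single closed-form comparison of the last two elements guarded by a length check.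
import Mathlib
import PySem

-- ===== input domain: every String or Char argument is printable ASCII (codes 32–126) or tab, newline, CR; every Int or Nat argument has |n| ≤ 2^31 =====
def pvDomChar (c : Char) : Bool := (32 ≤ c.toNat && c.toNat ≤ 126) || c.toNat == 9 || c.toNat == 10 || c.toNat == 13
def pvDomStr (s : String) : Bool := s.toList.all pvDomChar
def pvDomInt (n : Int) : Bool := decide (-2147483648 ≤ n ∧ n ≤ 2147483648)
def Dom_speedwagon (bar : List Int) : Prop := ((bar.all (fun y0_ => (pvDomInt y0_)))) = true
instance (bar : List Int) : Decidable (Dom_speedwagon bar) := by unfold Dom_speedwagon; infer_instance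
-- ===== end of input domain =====

-- B replaces A's whole-list scan (whose flag is overwritten each iteration) by one
-- closed-form comparison of the last two elements, guarded by a length check (simpler).

-- ===== PORT A =====
def speedwagon (bar : List Int) : Bool :=
  (PySem.List.pyRange 0 ((bar.length : Int) - 1) 1).foldl
    (fun _found i =>
      if PySem.List.pyGet? bar i == PySem.List.pyGet? bar (i + 1) then true else false)
    false

-- ===== PORT B =====
def speedwagon_alt (bar : List Int) : Bool :=
  decide (2 ≤ bar.length) && (PySem.List.pyGet? bar (-2) == PySem.List.pyGet? bar (-1))

-- ===== PRECONDITION & SPEC =====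
def Spec_speedwagon (bar : List Int) (out : Bool) : Prop := out = speedwagon_alt bar
instance (bar : List Int) (out : Bool) : Decidable (Spec_speedwagon bar out) := by unfold Spec_speedwagon; infer_instance

-- ===== CLAIM (what is proved, stated in full; the proofs are below) =====
def Claim_equal_speedwagon : Prop := ∀ (bar : List Int), Dom_speedwagon bar → Spec_speedwagon bar (speedwagon bar)

-- ===== LEMMAS AND PROOFS =====

-- A fold that ignores its accumulator returns g of the last element (or the init on []).
theorem foldl_overwrite {α β : Type} (g : α → β) (l : List α) (b : β) :
    l.foldl (fun _ x => g x) b = (l.getLast?.map g).getD b := by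
  induction l generalizing b with
  | nil => rfl
  | cons x xs ih =>
      cases xs with
      | nil => rfl
      | cons y ys => simpa using ih (g x)

-- ===== VERDICT (by name: the statement is the Claim_ definition above) =====
theorem speedwagon_spec : Claim_equal_speedwagon := by
  intro bar _
  unfold Spec_speedwagon speedwagon speedwagon_alt
  rw [foldl_overwrite]
  by_cases h2 : 2 ≤ bar.length
  · have hsplit : PySem.List.pyRange 0 ((bar.length : Int) - 1) 1
        = PySem.List.pyRange 0 ((bar.length : Int) - 2) 1 ++ [(bar.length : Int) - 2] := by
      have : ((bar.length : Int) - 1) = ((bar.length : Int) - 2) + 1 := by ring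
      rw [this, PySem.List.pyRange_one_succ_right (a := 0) (b := (bar.length : Int) - 2) (by omega)]
    rw [hsplit, List.getLast?_concat, Option.map_some, Option.getD_some]
    have e1 : ((bar.length : Int) - 2) + 1 = ((bar.length - 1 : Nat) : Int) := by omega
    have e2 : ((bar.length : Int) - 2) = ((bar.length - 2 : Nat) : Int) := by omega
    rw [e1, e2, PySem.List.pyGet?_neg_ofNat bar 2 (by omega) h2,
        PySem.List.pyGet?_neg_ofNat bar 1 (by omega) (by omega),
        PySem.List.pyGet?_natCast, PySem.List.pyGet?_natCast]
    simp [h2, beq_eq_decide]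
  · have hnil : PySem.List.pyRange 0 ((bar.length : Int) - 1) 1 = [] :=
      PySem.List.pyRange_one_eq_nil (by omega)
    simp [hnil, h2]
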